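-- pv_equiv track=rewrite | github.com/womri1998/ProjectEuler100s | problem112.py | bouncy
-- ===== SOURCE A (Python) =====
-- def bouncy(n):
--     up, down = False, False
--     while n >= 10:
--         if n % 10 < (n // 10) % 10:
--             down = True
--         elif n % 10 > (n // 10) % 10:
--             up = True
--         n //= 10
--     return up and down
-- ===== SOURCE B (Python) =====
-- def bouncy(n):
--     digits = []
--     while n > 0:
--         digits.append(n % 10)
--         n //= 10
--     return digits != sorted(digits) and digits != sorted(digits, reverse=True)
-- ===== Notes on version B (the rewrite author's own statement) =====
-- stated objective: alternative
-- what changed: B materializes the digit list and decides bounciness by comparing it with its sorted and reverse-sorted versions, instead of A's single arithmetic scan maintaining up/down flags over adjacent digit pairs.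
import Mathlib
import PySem

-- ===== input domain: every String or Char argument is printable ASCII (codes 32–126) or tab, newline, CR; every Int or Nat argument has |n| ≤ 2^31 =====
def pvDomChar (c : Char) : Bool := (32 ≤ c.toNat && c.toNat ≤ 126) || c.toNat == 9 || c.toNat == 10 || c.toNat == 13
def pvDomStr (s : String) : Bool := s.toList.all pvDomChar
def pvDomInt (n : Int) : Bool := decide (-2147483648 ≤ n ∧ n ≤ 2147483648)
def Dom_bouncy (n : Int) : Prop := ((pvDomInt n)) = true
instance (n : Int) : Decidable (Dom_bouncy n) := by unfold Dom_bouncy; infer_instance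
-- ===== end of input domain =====

-- B decides whether a number is bouncy by collecting its digit list and comparing it with its
-- sorted and reverse-sorted versions, instead of A's single arithmetic scan maintaining up/down
-- flags over adjacent digit pairs; objective: alternative (different algorithm, similar cost).

-- ===== PORT A =====
-- the while-loop of A: state (n, up, down)
def bouncyLoop (n : Int) (up down : Bool) : Bool :=
  if _h : 10 ≤ n then
    if PySem.Int.mod n 10 < PySem.Int.mod (PySem.Int.floordiv n 10) 10 then
      bouncyLoop (PySem.Int.floordiv n 10) up true
    else if PySem.Int.mod n 10 > PySem.Int.mod (PySem.Int.floordiv n 10) 10 then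
      bouncyLoop (PySem.Int.floordiv n 10) true down
    else
      bouncyLoop (PySem.Int.floordiv n 10) up down
  else up && down
termination_by n.toNat
decreasing_by
  all_goals
    have h1 : PySem.Int.floordiv n 10 < n :=
      (PySem.Int.floordiv_lt_iff_lt_mul (by norm_num)).mpr (by omega)
    omega

def bouncy (n : Int) : Bool := bouncyLoop n false false

-- ===== PORT B =====
-- the while-loop of B: collects the digits little-endian by appending
def digitsLoop (n : Int) (acc : List Int) : List Int :=
  if _h : 0 < n then digitsLoop (PySem.Int.floordiv n 10) (acc ++ [PySem.Int.mod n 10])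
  else acc
termination_by n.toNat
decreasing_by
  have h1 : PySem.Int.floordiv n 10 < n :=
    (PySem.Int.floordiv_lt_iff_lt_mul (by norm_num)).mpr (by omega)
  omega

def bouncy_alt (n : Int) : Bool :=
  let digits := digitsLoop n []
  (digits != PySem.List.sorted digits (fun x => x) false) &&
  (digits != PySem.List.sorted digits (fun x => x) true)

-- ===== PRECONDITION & SPEC =====
def Spec_bouncy (n : Int) (out : Bool) : Prop := out = bouncy_alt n
instance (n : Int) (out : Bool) : Decidable (Spec_bouncy n out) := by unfold Spec_bouncy; infer_instance

-- ===== CLAIM (what is proved, stated in full; the proofs are below) =====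
def Claim_equal_bouncy : Prop := ∀ (n : Int), Dom_bouncy n → Spec_bouncy n (bouncy n)

-- ===== LEMMAS AND PROOFS =====

-- the digit list of n, little-endian (structural version of digitsLoop)
def pvDigits (n : Int) : List Int :=
  if _h : 0 < n then PySem.Int.mod n 10 :: pvDigits (PySem.Int.floordiv n 10)
  else []
termination_by n.toNat
decreasing_by
  have h1 : PySem.Int.floordiv n 10 < n :=
    (PySem.Int.floordiv_lt_iff_lt_mul (by norm_num)).mpr (by omega)
  omega

-- some adjacent pair descends (l[i] > l[i+1]) / ascends (l[i] < l[i+1])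
def pvHasDesc : List Int → Bool
  | a :: b :: t => (b < a) || pvHasDesc (b :: t)
  | _ => false

def pvHasAsc : List Int → Bool
  | a :: b :: t => (a < b) || pvHasAsc (b :: t)
  | _ => false

theorem digitsLoop_eq (n : Int) : ∀ acc, digitsLoop n acc = acc ++ pvDigits n := by
  induction n using pvDigits.induct with
  | case1 n h ih =>
      intro acc
      rw [digitsLoop, pvDigits, dif_pos h, dif_pos h, ih]
      simp
  | case2 n h =>
      intro acc
      rw [digitsLoop, pvDigits, dif_neg h, dif_neg h]
      simp

theorem pvDigits_pos (n : Int) (h : 0 < n) :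
    pvDigits n = PySem.Int.mod n 10 :: pvDigits (PySem.Int.floordiv n 10) := by
  rw [pvDigits, dif_pos h]

theorem floordiv_ten_pos (n : Int) (h : 10 ≤ n) : 0 < PySem.Int.floordiv n 10 :=
  (PySem.Int.le_floordiv_iff_mul_le (q := 1) (by norm_num)).mpr (by omega)

theorem bouncyLoop_char (n : Int) (up down : Bool) :
    bouncyLoop n up down = ((up || pvHasDesc (pvDigits n)) && (down || pvHasAsc (pvDigits n))) := by
  induction n, up, down using bouncyLoop.induct with
  | case4 n up down h =>
      rw [bouncyLoop, dif_neg h]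
      have hd : pvHasDesc (pvDigits n) = false := by
        rw [pvDigits]; split
        · rename_i hp
          have hq : ¬ (0:Int) < PySem.Int.floordiv n 10 := fun hc =>
            h (by have := (PySem.Int.le_floordiv_iff_mul_le (a := n) (q := 1) (by norm_num)).mp hc; omega)
          rw [pvDigits, dif_neg hq]; rfl
        · rfl
      have ha : pvHasAsc (pvDigits n) = false := by
        rw [pvDigits]; split
        · rename_i hp
          have hq : ¬ (0:Int) < PySem.Int.floordiv n 10 := fun hc =>
            h (by have := (PySem.Int.le_floordiv_iff_mul_le (a := n) (q := 1) (by norm_num)).mp hc; omega)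
          rw [pvDigits, dif_neg hq]; rfl
        · rfl
      rw [hd, ha]; simp
  | case1 n up down h hlt ih =>
      have hq := floordiv_ten_pos n h
      rw [bouncyLoop, dif_pos h, if_pos hlt, ih,
          pvDigits_pos n (by omega), pvDigits_pos _ hq]
      simp only [pvHasDesc, pvHasAsc]
      rw [decide_eq_false (show ¬ PySem.Int.mod (PySem.Int.floordiv n 10) 10 < PySem.Int.mod n 10 by omega),
          decide_eq_true hlt]
      simp
  | case2 n up down h hnlt hgt ih =>
      have hq := floordiv_ten_pos n h
      rw [bouncyLoop, dif_pos h, if_neg hnlt, if_pos hgt, ih,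
          pvDigits_pos n (by omega), pvDigits_pos _ hq]
      simp only [pvHasDesc, pvHasAsc]
      rw [decide_eq_true hgt, decide_eq_false hnlt]
      simp
  | case3 n up down h hnlt hngt ih =>
      have hq := floordiv_ten_pos n h
      have heq : PySem.Int.mod n 10 = PySem.Int.mod (PySem.Int.floordiv n 10) 10 := by omega
      rw [bouncyLoop, dif_pos h, if_neg hnlt, if_neg hngt, ih,
          pvDigits_pos n (by omega), pvDigits_pos _ hq]
      simp only [pvHasDesc, pvHasAsc]
      rw [decide_eq_false (show ¬ PySem.Int.mod (PySem.Int.floordiv n 10) 10 < PySem.Int.mod n 10 by omega),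
          decide_eq_false hnlt]
      simp

theorem hasDesc_iff_not_chain (l : List Int) :
    pvHasDesc l = !decide (List.IsChain (· ≤ ·) l) := by
  induction l with
  | nil => simp [pvHasDesc]
  | cons a t ih =>
      cases t with
      | nil => simp [pvHasDesc]
      | cons b t' =>
          simp only [pvHasDesc, ih, List.isChain_cons_cons]
          by_cases hab : a ≤ b <;> simp [hab] <;> omega

theorem hasAsc_iff_not_chain (l : List Int) :
    pvHasAsc l = !decide (List.IsChain (· ≥ ·) l) := by
  induction l with
  | nil => simp [pvHasAsc]
  | cons a t ih =>
      cases t with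
      | nil => simp [pvHasAsc]
      | cons b t' =>
          simp only [pvHasAsc, ih, List.isChain_cons_cons]
          by_cases hab : b ≤ a <;> simp [hab, ge_iff_le] <;> omega

theorem eq_sorted_iff_chain (l : List Int) :
    l = PySem.List.sorted l (fun x => x) false ↔ List.IsChain (· ≤ ·) l := by
  constructor
  · intro h
    rw [List.isChain_iff_pairwise]
    have := PySem.List.sorted_pairwise (xs := l) (key := fun x => x)
    rw [← h] at this
    exact this
  · intro h
    have hp : List.Pairwise (fun a b : Int => a ≤ b) l := List.isChain_iff_pairwise.mp h
    exact (PySem.List.sorted_eq_self_of_pairwise l (fun x => x) hp).symm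

theorem eq_sorted_rev_iff_chain (l : List Int) :
    l = PySem.List.sorted l (fun x => x) true ↔ List.IsChain (· ≥ ·) l := by
  constructor
  · intro h
    rw [List.isChain_iff_pairwise]
    have := PySem.List.sorted_pairwise_rev (xs := l) (key := fun x => x)
    rw [← h] at this
    exact this
  · intro h
    have hp : List.Pairwise (fun a b : Int => b ≤ a) l := List.isChain_iff_pairwise.mp h
    exact (PySem.List.sorted_rev_eq_self_of_pairwise l (fun x => x) hp).symm

-- ===== VERDICT (by name: the statement is the Claim_ definition above) =====
theorem bouncy_spec : Claim_equal_bouncy := by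
  intro n _
  show bouncy n = bouncy_alt n
  unfold bouncy bouncy_alt
  rw [bouncyLoop_char, digitsLoop_eq]
  simp only [List.nil_append, Bool.false_or]
  rw [hasDesc_iff_not_chain, hasAsc_iff_not_chain]
  have e1 : (pvDigits n != PySem.List.sorted (pvDigits n) (fun x => x) false)
      = !decide (List.IsChain (· ≤ ·) (pvDigits n)) := by
    by_cases hc : List.IsChain (· ≤ ·) (pvDigits n)
    · simp [hc, bne, ((eq_sorted_iff_chain _).mpr hc).symm]
    · have hne : pvDigits n ≠ PySem.List.sorted (pvDigits n) (fun x => x) false :=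
        fun he => hc ((eq_sorted_iff_chain _).mp he)
      simp [hc, bne, hne]
  have e2 : (pvDigits n != PySem.List.sorted (pvDigits n) (fun x => x) true)
      = !decide (List.IsChain (· ≥ ·) (pvDigits n)) := by
    by_cases hc : List.IsChain (· ≥ ·) (pvDigits n)
    · simp [hc, bne, ((eq_sorted_rev_iff_chain _).mpr hc).symm]
    · have hne : pvDigits n ≠ PySem.List.sorted (pvDigits n) (fun x => x) true :=
        fun he => hc ((eq_sorted_rev_iff_chain _).mp he)
      simp [hc, bne, hne]
  rw [e1, e2]
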